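-- pv_equiv track=rewrite | github.com/Negadiay/AOIS | Lab2/main/main.py | get_numeric_forms
-- ===== SOURCE A (Python) =====
-- def list_len(lst):
--     count = 0
--     try:
--         while True:
--             _ = lst[count]
--             count += 1
--     except:
--         return count
--
-- def list_append(lst, val):
--     new_lst = []
--     i = 0
--     while i < list_len(lst):
--         new_lst += [lst[i]]
--         i += 1
--     new_lst += [val]
--     return new_lst
--
-- def get_numeric_forms(table):
--     sdnf = []
--     sknf = []
--     i = 0
--     while i < list_len(table):
--         if table[i][1] == 1:
--             sdnf = list_append(sdnf, i)
--         else: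
--             sknf = list_append(sknf, i)
--         i += 1
--     return sdnf, sknf
-- ===== SOURCE B (Python) =====
-- def get_numeric_forms(table):
--     sdnf = [i for i, row in enumerate(table) if row[1] == 1]
--     sknf = [i for i, row in enumerate(table) if row[1] != 1]
--     return sdnf, sknf
-- ===== Notes on version B (the rewrite author's own statement) =====
-- stated objective: faster
-- what changed: A rebuilds each result list from scratch via a quadratic hand-rolled list_append (with list_len recounting by try/except) inside the index loop; B makes a single enumerate pass per output list with native list comprehensions.
import Mathlib
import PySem

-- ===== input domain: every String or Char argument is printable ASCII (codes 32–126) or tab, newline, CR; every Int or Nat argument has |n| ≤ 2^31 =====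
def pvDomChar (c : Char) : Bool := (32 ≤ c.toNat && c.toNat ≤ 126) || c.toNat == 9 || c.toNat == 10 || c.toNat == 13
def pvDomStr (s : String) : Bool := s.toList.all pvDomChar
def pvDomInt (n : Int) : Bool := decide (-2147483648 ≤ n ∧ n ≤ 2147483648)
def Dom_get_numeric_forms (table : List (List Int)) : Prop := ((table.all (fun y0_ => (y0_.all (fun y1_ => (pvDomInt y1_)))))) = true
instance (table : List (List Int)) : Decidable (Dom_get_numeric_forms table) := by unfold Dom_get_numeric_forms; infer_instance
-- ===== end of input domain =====

-- B replaces A's quadratic hand-rolled list_append/list_len loops by one enumerate pass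
-- per output list (native comprehensions); equal on all tables whose rows have ≥ 2 entries.

-- ===== PORT A =====
-- list_len: counts elements by indexing until failure (count-up loop)
def pvListLenLoop {α : Type} : List α → Int → Int
  | [], c => c
  | _ :: t, c => pvListLenLoop t (c + 1)

def pvListLen {α : Type} (lst : List α) : Int := pvListLenLoop lst 0

-- list_append: copies lst element by element via an index loop, then appends val
def pvListAppend (lst : List Int) (val : Int) : List Int :=
  ((PySem.List.pyRange 0 (pvListLen lst) 1).foldl
    (fun acc i => acc ++ [PySem.List.pyGetD lst i 0]) []) ++ [val]

def get_numeric_forms (table : List (List Int)) : List Int × List Int :=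
  (PySem.List.pyRange 0 (pvListLen table) 1).foldl
    (fun (st : List Int × List Int) i =>
      if PySem.List.pyGetD (PySem.List.pyGetD table i []) 1 0 = 1 then
        (pvListAppend st.1 i, st.2)
      else
        (st.1, pvListAppend st.2 i))
    ([], [])

-- ===== PORT B =====
def get_numeric_forms_alt (table : List (List Int)) : List Int × List Int :=
  ((PySem.List.enumerate table 0).filterMap
      (fun p => if PySem.List.pyGetD p.2 1 0 = 1 then some p.1 else none),
   (PySem.List.enumerate table 0).filterMap
      (fun p => if PySem.List.pyGetD p.2 1 0 ≠ 1 then some p.1 else none))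

-- ===== PRECONDITION & SPEC =====
-- Pre_: every row has at least 2 entries; on a shorter row both Pythons raise IndexError at table[i][1].
def Pre_get_numeric_forms (table : List (List Int)) : Prop :=
  ∀ row ∈ table, 2 ≤ row.length
instance (table : List (List Int)) : Decidable (Pre_get_numeric_forms table) := by
  unfold Pre_get_numeric_forms; infer_instance

def pvWitness_get_numeric_forms : List (List Int) := [[0, 1], [1, 0], [2, 1]]

def Spec_get_numeric_forms (table : List (List Int)) (out : List Int × List Int) : Prop := out = get_numeric_forms_alt table
instance (table : List (List Int)) (out : List Int × List Int) : Decidable (Spec_get_numeric_forms table out) := by unfold Spec_get_numeric_forms; infer_instance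

-- ===== CLAIM (what is proved, stated in full; the proofs are below) =====
def Claim_equal_get_numeric_forms : Prop := ∀ (table : List (List Int)), Dom_get_numeric_forms table → Pre_get_numeric_forms table → Spec_get_numeric_forms table (get_numeric_forms table)

-- ===== LEMMAS AND PROOFS =====

theorem pvListLenLoop_eq {α : Type} (l : List α) : ∀ c : Int, pvListLenLoop l c = c + l.length := by
  induction l with
  | nil => intro c; simp [pvListLenLoop]
  | cons h t ih => intro c; simp [pvListLenLoop, ih]; ring

theorem pvListLen_eq {α : Type} (l : List α) : pvListLen l = (l.length : Int) := by
  simp [pvListLen, pvListLenLoop_eq]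

theorem pvListAppend_eq (l : List Int) (v : Int) : pvListAppend l v = l ++ [v] := by
  unfold pvListAppend
  rw [pvListLen_eq, PySem.List.foldl_pyRange_zero_pyGetD' l 0 (fun acc x => acc ++ [x]) []]
  congr 1
  induction l using List.reverseRecOn with
  | nil => rfl
  | append_singleton xs x ih => simp [List.foldl_append, ih]

theorem pvGetD_append_lt (xs : List (List Int)) (r : List Int) (i : Int)
    (h0 : 0 ≤ i) (h1 : i < (xs.length : Int)) :
    PySem.List.pyGetD (xs ++ [r]) i ([] : List Int) = PySem.List.pyGetD xs i [] := by
  obtain ⟨n, rfl⟩ := Int.eq_ofNat_of_zero_le h0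
  have hn : n < xs.length := by exact_mod_cast h1
  simp [PySem.List.pyGetD_natCast, List.getD, List.getElem?_append_left hn]

theorem A_eq_B (table : List (List Int)) : get_numeric_forms table = get_numeric_forms_alt table := by
  induction table using List.reverseRecOn with
  | nil => rfl
  | append_singleton xs r ih =>
    unfold get_numeric_forms at ih ⊢
    unfold get_numeric_forms_alt at ih ⊢
    rw [pvListLen_eq] at ih ⊢
    have hlen : ((xs ++ [r]).length : Int) = (xs.length : Int) + 1 := by simp
    rw [hlen, PySem.List.pyRange_one_succ_right (by positivity), List.foldl_append]
    have hin :
        (PySem.List.pyRange 0 (xs.length : Int) 1).foldl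
          (fun (st : List Int × List Int) i =>
            if PySem.List.pyGetD (PySem.List.pyGetD (xs ++ [r]) i ([] : List Int)) 1 0 = 1 then
              (pvListAppend st.1 i, st.2)
            else (st.1, pvListAppend st.2 i)) ([], []) =
        (PySem.List.pyRange 0 (xs.length : Int) 1).foldl
          (fun (st : List Int × List Int) i =>
            if PySem.List.pyGetD (PySem.List.pyGetD xs i ([] : List Int)) 1 0 = 1 then
              (pvListAppend st.1 i, st.2)
            else (st.1, pvListAppend st.2 i)) ([], []) := by
      apply PySem.List.foldl_congr_mem
      intro acc x hx
      rw [PySem.List.mem_pyRange_one] at hx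
      rw [pvGetD_append_lt xs r x hx.1 hx.2]
    rw [hin, ih]
    simp only [PySem.List.enumerate_append, List.filterMap_append,
      PySem.List.enumerate, List.filterMap]
    by_cases h : PySem.List.pyGetD r 1 0 = 1 <;>
      simp [h, List.foldl, pvListAppend_eq]

-- ===== VERDICT (by name: the statement is the Claim_ definition above) =====
theorem get_numeric_forms_spec : Claim_equal_get_numeric_forms := by
  intro table _ _
  exact A_eq_B table
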